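-- pv_equiv track=rewrite | github.com/challenger0303/vr_eyebrow | gui.py | _select_update_asset
-- ===== SOURCE A (Python) =====
-- def _select_update_asset(assets):
--     if not assets:
--         return None
--     preferred = ["gui.exe", "vreyebrowtracker.exe", "VREyebrowTracker.exe"]
--     for name in preferred:
--         for a in assets:
--             if str(a.get("name", "")).lower() == name.lower():
--                 return a
--     for a in assets:
--         if str(a.get("name", "")).lower().endswith(".exe"):
--             return a
--     return None
-- ===== SOURCE B (Python) =====
-- def _select_update_asset(assets):
--     # One pass: index first asset per lowercased name, remember first '.exe' asset.
--     byname = {}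
--     first_exe = None
--     for a in assets:
--         key = str(a.get("name", "")).lower()
--         if key not in byname:
--             byname[key] = a
--         if first_exe is None and key.endswith(".exe"):
--             first_exe = a
--     for name in ("gui.exe", "vreyebrowtracker.exe"):
--         if name in byname:
--             return byname[name]
--     return first_exe
-- ===== Notes on version B (the rewrite author's own statement) =====
-- stated objective: idiomatic
-- what changed: A rescans the asset list once per preferred name and again for '.exe'; B makes one pass building a first-occurrence dict from lowercased name to asset plus the first '.exe' asset, then answers with two dict lookups.
import Mathlib
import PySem

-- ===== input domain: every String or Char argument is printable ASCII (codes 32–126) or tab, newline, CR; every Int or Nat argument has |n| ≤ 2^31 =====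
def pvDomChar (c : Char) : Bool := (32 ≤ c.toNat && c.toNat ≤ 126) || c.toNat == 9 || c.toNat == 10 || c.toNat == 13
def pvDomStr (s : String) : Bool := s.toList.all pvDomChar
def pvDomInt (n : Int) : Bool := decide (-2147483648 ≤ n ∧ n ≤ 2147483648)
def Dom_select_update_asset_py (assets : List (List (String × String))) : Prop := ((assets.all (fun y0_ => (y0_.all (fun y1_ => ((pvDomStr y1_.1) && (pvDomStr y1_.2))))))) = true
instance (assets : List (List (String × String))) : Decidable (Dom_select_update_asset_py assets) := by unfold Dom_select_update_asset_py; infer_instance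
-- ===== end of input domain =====

-- B replaces A's up-to-four scans by ONE pass building a first-occurrence name index
-- plus the first '.exe' asset, then two dict lookups (objective: idiomatic single-pass index).

-- str(a.get("name", "")).lower()  — shared accessor (dict lookup = first match in the assoc list)
def pvLowName (a : List (String × String)) : String :=
  PySem.Str.lower (((a.find? (fun p => p.1 == "name")).map Prod.snd).getD "")

-- ===== PORT A =====
-- for name in preferred: for a in assets: if lowName a == name.lower(): return a
def pvLoopPreferred : List String → List (List (String × String)) → Option (List (String × String))
  | [], _ => none
  | n :: rest, assets =>
    match assets.find? (fun a => pvLowName a == PySem.Str.lower n) with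
    | some a => some a
    | none => pvLoopPreferred rest assets

def select_update_asset_py (assets : List (List (String × String))) : Option (List (String × String)) :=
  if assets.isEmpty then none
  else
    match pvLoopPreferred ["gui.exe", "vreyebrowtracker.exe", "VREyebrowTracker.exe"] assets with
    | some a => some a
    | none => assets.find? (fun a => PySem.Str.endswith (pvLowName a) ".exe")

-- ===== PORT B =====
-- one fold: (first-occurrence dict of lowered name ↦ asset, first '.exe' asset)
def pvStep (st : PySem.Dict String (List (String × String)) × Option (List (String × String)))
    (a : List (String × String)) :
    PySem.Dict String (List (String × String)) × Option (List (String × String)) :=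
  let key := pvLowName a
  ((if st.1.contains key then st.1 else st.1.insert key a),
   (if st.2.isNone && PySem.Str.endswith key ".exe" then some a else st.2))

def pvBuild (assets : List (List (String × String))) :
    PySem.Dict String (List (String × String)) × Option (List (String × String)) :=
  assets.foldl pvStep (PySem.Dict.empty, none)

def select_update_asset_py_alt (assets : List (List (String × String))) : Option (List (String × String)) :=
  match (pvBuild assets).1.get? "gui.exe" with
  | some a => some a
  | none =>
    match (pvBuild assets).1.get? "vreyebrowtracker.exe" with
    | some a => some a
    | none => (pvBuild assets).2

-- ===== PRECONDITION & SPEC =====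
def Spec_select_update_asset_py (assets : List (List (String × String))) (out : Option (List (String × String))) : Prop := out = select_update_asset_py_alt assets
instance (assets : List (List (String × String))) (out : Option (List (String × String))) : Decidable (Spec_select_update_asset_py assets out) := by unfold Spec_select_update_asset_py; infer_instance

-- ===== CLAIM (what is proved, stated in full; the proofs are below) =====
def Claim_equal_select_update_asset_py : Prop := ∀ (assets : List (List (String × String))), Dom_select_update_asset_py assets → Spec_select_update_asset_py assets (select_update_asset_py assets)

-- ===== LEMMAS AND PROOFS =====

theorem pvStep_eq (d : PySem.Dict String (List (String × String)))
    (fe : Option (List (String × String))) (a : List (String × String)) :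
    pvStep (d, fe) a
    = ((if d.contains (pvLowName a) then d else d.insert (pvLowName a) a),
       (if fe.isNone && PySem.Str.endswith (pvLowName a) ".exe" then some a else fe)) := rfl

-- the dict component of the fold looks up to the FIRST asset with that lowered name
theorem pvBuild_get? (assets : List (List (String × String)))
    (d : PySem.Dict String (List (String × String))) (fe : Option (List (String × String))) (k : String) :
    (assets.foldl pvStep (d, fe)).1.get? k
    = (d.get? k).or (assets.find? (fun a => pvLowName a == k)) := by
  induction assets generalizing d fe with
  | nil => simp
  | cons a rest ih =>
    rw [List.foldl_cons, pvStep_eq]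
    by_cases hk : (pvLowName a == k) = true
    · have hk' : pvLowName a = k := by simpa using hk
      rw [List.find?_cons_of_pos (p := fun x => pvLowName x == k) hk]
      by_cases hc : d.contains (pvLowName a) = true
      · have hs : (d.get? k).isSome := by
          rw [← hk']; rw [PySem.Dict.contains_eq_isSome_get?] at hc; exact hc
        obtain ⟨v, hv⟩ := Option.isSome_iff_exists.mp hs
        rw [if_pos hc, ih, hv]
        simp
      · have hn : d.get? k = none := by
          rw [← hk']; rw [PySem.Dict.contains_eq_isSome_get?] at hc; simpa using hc
        rw [if_neg hc, ih, hk', PySem.Dict.get?_insert_self, hn]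
        simp
    · have hk' : pvLowName a ≠ k := by simpa using hk
      rw [List.find?_cons_of_neg (p := fun x => pvLowName x == k) hk]
      by_cases hc : d.contains (pvLowName a) = true
      · rw [if_pos hc, ih]
      · rw [if_neg hc, ih, PySem.Dict.get?_insert_of_ne _ _ (fun h => hk' h.symm)]

-- the second component of the fold is the first '.exe' asset
theorem pvBuild_exe (assets : List (List (String × String)))
    (d : PySem.Dict String (List (String × String))) (fe : Option (List (String × String))) :
    (assets.foldl pvStep (d, fe)).2
    = fe.or (assets.find? (fun a => PySem.Str.endswith (pvLowName a) ".exe")) := by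
  induction assets generalizing d fe with
  | nil => simp
  | cons a rest ih =>
    rw [List.foldl_cons, pvStep_eq]
    cases fe with
    | some v => simp only [Option.isNone_some, Bool.false_and, Bool.false_eq_true, if_false, ih,
        Option.some_or]
    | none =>
      by_cases he : PySem.Str.endswith (pvLowName a) ".exe" = true
      · rw [List.find?_cons_of_pos (p := fun x => PySem.Str.endswith (pvLowName x) ".exe") he, ih]
        have he' : PySem.Chars.endswith (pvLowName a).toList ['.', 'e', 'x', 'e'] = true := by
          simpa using he
        simp [he']
      · rw [List.find?_cons_of_neg (p := fun x => PySem.Str.endswith (pvLowName x) ".exe") he, ih]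
        have he' : PySem.Chars.endswith (pvLowName a).toList ['.', 'e', 'x', 'e'] = false := by
          simpa using he
        simp [he']

theorem lower_gui : PySem.Str.lower "gui.exe" = "gui.exe" := by decide
theorem lower_vre1 : PySem.Str.lower "vreyebrowtracker.exe" = "vreyebrowtracker.exe" := by decide
theorem lower_vre2 : PySem.Str.lower "VREyebrowTracker.exe" = "vreyebrowtracker.exe" := by decide

-- ===== VERDICT (by name: the statement is the Claim_ definition above) =====
theorem select_update_asset_py_spec : Claim_equal_select_update_asset_py := by
  intro assets _
  unfold Spec_select_update_asset_py select_update_asset_py select_update_asset_py_alt pvBuild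
  rw [pvBuild_get?, pvBuild_get?, pvBuild_exe]
  simp only [PySem.Dict.get?_empty, Option.none_or]
  cases assets with
  | nil => rfl
  | cons a rest =>
    simp only [List.isEmpty_cons, Bool.false_eq_true, if_false]
    simp only [pvLoopPreferred, lower_gui, lower_vre1, lower_vre2]
    cases hg : (a :: rest).find? (fun x => pvLowName x == "gui.exe") with
    | some v => simp
    | none =>
      simp only
      cases hv : (a :: rest).find? (fun x => pvLowName x == "vreyebrowtracker.exe") with
      | some v => simp
      | none => simp
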